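-- pv_equiv track=rewrite | github.com/cds-snc/sre-bot | app/modules/groups/mappings.py | primary_group_to_canonical
-- ===== SOURCE A (Python) =====
-- from typing import Optional, Dict, Iterable, Mapping, Tuple, List
--
-- def _local_name_from_primary(primary_name: str) -> str:
--     """Extract the local name segment from a primary group identifier.
--
--     If the primary group is an email (contains @), use the local part.
--     """
--     if not primary_name:
--         return ""
--     if "@" in primary_name:
--         return primary_name.split("@", 1)[0]
--     return primary_name
--
-- def primary_group_to_canonical(
--     primary_group_name: str, prefixes: Optional[Iterable[str]] = None
-- ) -> str:
--     """Return the canonical group name for a given primary provider group identifier.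
--
--     If `prefixes` is provided, it will be used to detect and strip a known
--     provider prefix from the primary-style name. If not provided the input is
--     treated as canonical (except for email local-part extraction handled by
--     `_local_name_from_primary`).
--     """
--     if not primary_group_name:
--         return ""
--
--     name = _local_name_from_primary(primary_group_name).strip()
--     if not name:
--         return ""
--
--     if not prefixes:
--         return name
--
--     # Try to match the longest prefix first to avoid ambiguous shorter matches
--     sorted_prefixes = sorted({p for p in prefixes if p}, key=len, reverse=True)
--     for p in sorted_prefixes:
--         if name.startswith(f"{p}-"):
--             return name[len(p) + 1 :]
--     return name
-- ===== SOURCE B (Python) =====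
-- from typing import Optional, Iterable
--
--
-- def _local_name_from_primary(primary_name: str) -> str:
--     if not primary_name:
--         return ""
--     if "@" in primary_name:
--         return primary_name.split("@", 1)[0]
--     return primary_name
--
--
-- def primary_group_to_canonical(
--     primary_group_name: str, prefixes: Optional[Iterable[str]] = None
-- ) -> str:
--     if not primary_group_name:
--         return ""
--
--     name = _local_name_from_primary(primary_group_name).strip()
--     if not name:
--         return ""
--
--     if not prefixes:
--         return name
--
--     # Single linear scan for the longest matching prefix (no sort, no set).
--     best = None
--     for p in prefixes:
--         if p and name.startswith(p + "-") and (best is None or len(p) > len(best)):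
--             best = p
--     if best is None:
--         return name
--     return name[len(best) + 1:]
-- ===== Notes on version B (the rewrite author's own statement) =====
-- stated objective: alternative
-- what changed: Replaced the set-build + sort-by-length + first-match scan with a single linear pass that tracks the longest matching prefix.
import Mathlib
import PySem

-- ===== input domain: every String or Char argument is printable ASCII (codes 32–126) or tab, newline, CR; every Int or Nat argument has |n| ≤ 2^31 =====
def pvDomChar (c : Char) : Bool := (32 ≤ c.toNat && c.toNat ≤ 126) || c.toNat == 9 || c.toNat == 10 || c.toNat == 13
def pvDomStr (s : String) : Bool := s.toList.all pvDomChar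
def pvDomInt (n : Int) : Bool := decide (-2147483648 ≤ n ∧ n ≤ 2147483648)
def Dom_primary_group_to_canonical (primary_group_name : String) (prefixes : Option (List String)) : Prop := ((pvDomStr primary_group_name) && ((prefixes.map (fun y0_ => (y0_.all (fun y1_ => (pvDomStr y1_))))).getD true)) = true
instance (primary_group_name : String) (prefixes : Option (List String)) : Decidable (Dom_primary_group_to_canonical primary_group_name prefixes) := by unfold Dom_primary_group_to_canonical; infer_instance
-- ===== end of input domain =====

-- B replaces A's set-build + sort-by-length + first-match loop by one linear pass tracking the
-- longest matching prefix (objective: alternative algorithm, no sort or set needed).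

-- ===== PORT A =====
-- shared helper: Python _local_name_from_primary (used verbatim by both A and B)
-- primary_name.split("@", 1)[0]: split of a string with "@" is nonempty, so index 0 exists;
-- ported with pyGet?/getD "" (the default is never reached).
def pvLocalName (primary_name : String) : String :=
  if primary_name = "" then ""
  else if PySem.Str.isIn "@" primary_name then
    (PySem.List.pyGet? ((PySem.Str.splitMax? primary_name "@" 1).getD []) 0).getD ""
  else primary_name

-- A's for-loop over the sorted prefixes with early return
def pvLoopA (name : String) : List String → String
  | [] => name
  | p :: t =>
    if PySem.Str.startswith name (p ++ "-") then
      PySem.Str.slice name (some (PySem.Str.len p + 1)) none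
    else pvLoopA name t

def primary_group_to_canonical (primary_group_name : String) (prefixes : Option (List String)) : String :=
  if primary_group_name = "" then ""
  else
    let name := PySem.Str.strip (pvLocalName primary_group_name)
    if name = "" then ""
    else
      match prefixes with
      | none => name
      | some ps =>
        if ps = [] then name
        else
          pvLoopA name
            (PySem.List.sorted (PySem.Set.ofList (ps.filter (fun p => p != "")))
              (fun p => PySem.Str.len p) true)

-- ===== PORT B =====
-- the body of B's single for-loop: if p and name.startswith(p + "-") and (best is None or len(p) > len(best)): best = p
def pvBestStep (name : String) (best : Option String) (p : String) : Option String :=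
  if (p != "") && PySem.Str.startswith name (p ++ "-")
      && (match best with
          | none => true
          | some b => decide (PySem.Str.len b < PySem.Str.len p)) then
    some p
  else best

def primary_group_to_canonical_alt (primary_group_name : String) (prefixes : Option (List String)) : String :=
  if primary_group_name = "" then ""
  else
    let name := PySem.Str.strip (pvLocalName primary_group_name)
    if name = "" then ""
    else
      match prefixes with
      | none => name
      | some ps =>
        if ps = [] then name
        else
          match ps.foldl (pvBestStep name) none with
          | none => name
          | some b => PySem.Str.slice name (some (PySem.Str.len b + 1)) none

-- ===== PRECONDITION & SPEC =====
def Spec_primary_group_to_canonical (primary_group_name : String) (prefixes : Option (List String)) (out : String) : Prop := out = primary_group_to_canonical_alt primary_group_name prefixes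
instance (primary_group_name : String) (prefixes : Option (List String)) (out : String) : Decidable (Spec_primary_group_to_canonical primary_group_name prefixes out) := by unfold Spec_primary_group_to_canonical; infer_instance

-- ===== CLAIM (what is proved, stated in full; the proofs are below) =====
def Claim_equal_primary_group_to_canonical : Prop := ∀ (primary_group_name : String) (prefixes : Option (List String)), Dom_primary_group_to_canonical primary_group_name prefixes → Spec_primary_group_to_canonical primary_group_name prefixes (primary_group_to_canonical primary_group_name prefixes)

-- ===== LEMMAS AND PROOFS =====

-- two matching prefixes of the same length are the same string
lemma pv_match_uniq (name p q : String)
    (hp : PySem.Str.startswith name (p ++ "-") = true)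
    (hq : PySem.Str.startswith name (q ++ "-") = true)
    (hl : PySem.Str.len p = PySem.Str.len q) : p = q := by
  simp only [PySem.Str.startswith_eq, PySem.Chars.startswith_iff, String.toList_append] at hp hq
  have hp' : p.toList <+: name.toList := (List.prefix_append p.toList "-".toList).trans hp
  have hq' : q.toList <+: name.toList := (List.prefix_append q.toList "-".toList).trans hq
  have hlen : p.toList.length = q.toList.length := by
    simp only [PySem.Str.len_eq] at hl; exact_mod_cast hl
  have : p.toList = q.toList := by
    rw [List.prefix_iff_eq_take] at hp' hq'
    rw [hp', hq', hlen]
  exact String.toList_inj.mp this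

-- invariant of B's fold: the accumulator is a longest nonempty matching prefix of what was seen
def pvIsBest (name : String) (cands : List String) : Option String → Prop
  | none => ∀ p ∈ cands, p = "" ∨ PySem.Str.startswith name (p ++ "-") = false
  | some b => b ≠ "" ∧ PySem.Str.startswith name (b ++ "-") = true ∧ b ∈ cands ∧
      ∀ q ∈ cands, q ≠ "" → PySem.Str.startswith name (q ++ "-") = true →
        PySem.Str.len q ≤ PySem.Str.len b

lemma pv_fold_inv (name : String) : ∀ (ps seen : List String) (acc : Option String),
    pvIsBest name seen acc →
    pvIsBest name (seen ++ ps) (ps.foldl (pvBestStep name) acc) := by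
  intro ps
  induction ps with
  | nil => intro seen acc h; simpa using h
  | cons p t ih =>
    intro seen acc h
    have hstep : pvIsBest name (seen ++ [p]) (pvBestStep name acc p) := by
      cases acc with
      | none =>
        by_cases hc : ((p != "") && PySem.Str.startswith name (p ++ "-") && true) = true
        · have hred : pvBestStep name none p = some p := by
            unfold pvBestStep; rw [if_pos hc]
          rw [hred]
          simp only [Bool.and_eq_true, bne_iff_ne, ne_eq] at hc
          refine ⟨hc.1.1, hc.1.2, by simp, ?_⟩
          intro q hq hqne hqm
          rcases List.mem_append.mp hq with hq | hq
          · rcases h q hq with h' | h'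
            · exact absurd h' hqne
            · rw [h'] at hqm; cases hqm
          · simp at hq; subst hq; exact le_refl _
        · have hred : pvBestStep name none p = none := by
            unfold pvBestStep; rw [if_neg hc]
          rw [hred]
          simp only [Bool.and_eq_true, bne_iff_ne, ne_eq, not_and, Bool.and_true] at hc
          intro q hq
          rcases List.mem_append.mp hq with hq | hq
          · exact h q hq
          · simp at hq; subst hq
            by_cases hqe : q = ""
            · exact Or.inl hqe
            · by_cases hqm : PySem.Str.startswith name (q ++ "-") = true
              · exact absurd hqm (by simpa [hqe] using hc)
              · exact Or.inr (by simpa using hqm)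
      | some b =>
        obtain ⟨hbne, hbm, hbmem, hbmax⟩ := h
        by_cases hc : ((p != "") && PySem.Str.startswith name (p ++ "-")
            && decide (PySem.Str.len b < PySem.Str.len p)) = true
        · have hred : pvBestStep name (some b) p = some p := by
            unfold pvBestStep; rw [if_pos hc]
          rw [hred]
          simp only [Bool.and_eq_true, bne_iff_ne, ne_eq, decide_eq_true_eq] at hc
          refine ⟨hc.1.1, hc.1.2, by simp, ?_⟩
          intro q hq hqne hqm
          rcases List.mem_append.mp hq with hq | hq
          · have := hbmax q hq hqne hqm
            have := hc.2
            omega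
          · simp at hq; subst hq; exact le_refl _
        · have hred : pvBestStep name (some b) p = some b := by
            unfold pvBestStep; rw [if_neg hc]
          rw [hred]
          simp only [Bool.and_eq_true, bne_iff_ne, ne_eq, decide_eq_true_eq, not_and] at hc
          refine ⟨hbne, hbm, List.mem_append.mpr (Or.inl hbmem), ?_⟩
          intro q hq hqne hqm
          rcases List.mem_append.mp hq with hq | hq
          · exact hbmax q hq hqne hqm
          · simp at hq; subst hq
            have := hc ⟨hqne, hqm⟩
            omega
    have := ih (seen ++ [p]) (pvBestStep name acc p) hstep
    simpa [List.append_assoc] using this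

-- A's loop over a length-descending list returns the same answer as any longest-match witness
lemma pv_loopA_spec (name : String) : ∀ (sp : List String) (r : Option String),
    sp.Pairwise (fun a b => PySem.Str.len b ≤ PySem.Str.len a) →
    (match r with
     | none => ∀ q ∈ sp, PySem.Str.startswith name (q ++ "-") = false
     | some b => b ∈ sp ∧ PySem.Str.startswith name (b ++ "-") = true ∧
         ∀ q ∈ sp, PySem.Str.startswith name (q ++ "-") = true →
           PySem.Str.len q ≤ PySem.Str.len b) →
    pvLoopA name sp =
      (match r with
       | none => name
       | some b => PySem.Str.slice name (some (PySem.Str.len b + 1)) none) := by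
  intro sp
  induction sp with
  | nil =>
    intro r _ hr
    cases r with
    | none => rfl
    | some b => exact absurd hr.1 (by simp)
  | cons p t ih =>
    intro r hpw hr
    have hhead : ∀ q ∈ t, PySem.Str.len q ≤ PySem.Str.len p := (List.pairwise_cons.mp hpw).1
    have htail := (List.pairwise_cons.mp hpw).2
    have hunf : pvLoopA name (p :: t)
        = if PySem.Str.startswith name (p ++ "-") then
            PySem.Str.slice name (some (PySem.Str.len p + 1)) none
          else pvLoopA name t := rfl
    by_cases hM : PySem.Str.startswith name (p ++ "-") = true
    · cases r with
      | none =>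
        have h0 := hr p (by simp)
        rw [h0] at hM
        cases hM
      | some b =>
        obtain ⟨hbmem, hbm, hbmax⟩ := hr
        have h1 : PySem.Str.len b ≤ PySem.Str.len p := by
          rcases List.mem_cons.mp hbmem with hb | hb
          · simp [hb]
          · exact hhead b hb
        have h2 : PySem.Str.len p ≤ PySem.Str.len b := hbmax p (by simp) hM
        have hpb : p = b := pv_match_uniq name p b hM hbm (le_antisymm h2 h1)
        rw [hunf, if_pos hM, hpb]
    · rw [hunf, if_neg hM]
      apply ih r htail
      cases r with
      | none => exact fun q hq => hr q (by simp [hq])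
      | some b =>
        obtain ⟨hbmem, hbm, hbmax⟩ := hr
        have hbne : b ≠ p := fun h => hM (h ▸ hbm)
        refine ⟨?_, hbm, fun q hq hqm => hbmax q (by simp [hq]) hqm⟩
        rcases List.mem_cons.mp hbmem with hb | hb
        · exact absurd hb hbne
        · exact hb

lemma pv_core (name : String) (ps : List String) :
    pvLoopA name
      (PySem.List.sorted (PySem.Set.ofList (ps.filter (fun p => p != "")))
        (fun p => PySem.Str.len p) true)
    = (match ps.foldl (pvBestStep name) none with
       | none => name
       | some b => PySem.Str.slice name (some (PySem.Str.len b + 1)) none) := by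
  have hbest : pvIsBest name ps (ps.foldl (pvBestStep name) none) := by
    have := pv_fold_inv name ps [] none (by intro p hp; simp at hp)
    simpa using this
  have hmem : ∀ q, q ∈ PySem.List.sorted (PySem.Set.ofList (ps.filter (fun p => p != "")))
      (fun p => PySem.Str.len p) true ↔ (q ∈ ps ∧ q ≠ "") := by
    intro q
    rw [PySem.List.mem_sorted, PySem.Set.mem_ofList, List.mem_filter]
    simp
  apply pv_loopA_spec name _ (ps.foldl (pvBestStep name) none)
    (PySem.List.sorted_pairwise_rev _ _)
  cases hr : ps.foldl (pvBestStep name) none with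
  | none =>
    rw [hr] at hbest
    intro q hq
    obtain ⟨hqps, hqne⟩ := (hmem q).mp hq
    rcases hbest q hqps with h | h
    · exact absurd h hqne
    · exact h
  | some b =>
    rw [hr] at hbest
    obtain ⟨hbne, hbm, hbmem, hbmax⟩ := hbest
    refine ⟨(hmem b).mpr ⟨hbmem, hbne⟩, hbm, ?_⟩
    intro q hq hqm
    obtain ⟨hqps, hqne⟩ := (hmem q).mp hq
    exact hbmax q hqps hqne hqm

-- ===== VERDICT (by name: the statement is the Claim_ definition above) =====
theorem primary_group_to_canonical_spec : Claim_equal_primary_group_to_canonical := by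
  intro n ps _
  show primary_group_to_canonical n ps = primary_group_to_canonical_alt n ps
  unfold primary_group_to_canonical primary_group_to_canonical_alt
  by_cases h1 : n = ""
  · simp [h1]
  · simp only [h1, if_false]
    by_cases h2 : PySem.Str.strip (pvLocalName n) = ""
    · simp [h2]
    · simp only [h2, if_false]
      cases ps with
      | none => rfl
      | some l =>
        by_cases h3 : l = []
        · simp [h3]
        · simp only [h3, if_false]
          exact pv_core _ l
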